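-- pv_equiv track=rewrite | github.com/Redx-Pharma/chemical_utilities_os | src/chemutil/helpers.py | get_index_to_row_column_map
-- ===== SOURCE A (Python) =====
-- def get_index_to_row_column_map(n_mols: int, mols_per_row: int) -> dict:
--     """
--     Get a map of the index to the row and column in a grid layout
--
--     Args:
--         n_mols (int): The number of molecules
--         mols_per_row (int): The number of molecules to display on a row
--
--     Returns:
--         dict: The index to row and column mapping
--
--     >>> get_index_to_row_column_map(4, 2) # doctest: +NORMALIZE_WHITESPACE
--     {0: (0, 0), 1: (0, 1), 2: (1, 0), 3: (1, 1)}
--     """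
--
--     index_to_row_column_map = {}
--     r, c = 0, 0
--     for ith in range(n_mols):
--         index_to_row_column_map[ith] = (r, c)
--         if c < mols_per_row - 1:
--             c += 1
--         else:
--             c = 0
--             r += 1
--
--     return index_to_row_column_map
-- ===== SOURCE B (Python) =====
-- def get_index_to_row_column_map(n_mols: int, mols_per_row: int) -> dict:
--     # Closed-form index -> (row, col): divmod when the row width is positive;
--     # with a non-positive width the column never advances, one index per row.
--     if mols_per_row > 0:
--         return {i: divmod(i, mols_per_row) for i in range(n_mols)}
--     return {i: (i, 0) for i in range(n_mols)}
-- ===== Notes on version B (the rewrite author's own statement) =====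
-- stated objective: idiomatic
-- what changed: Replaces the stateful running (row, col) counters and carry branch with a direct divmod closed form per index (dict comprehension), keeping the non-positive-width case as one index per row.
import Mathlib
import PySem

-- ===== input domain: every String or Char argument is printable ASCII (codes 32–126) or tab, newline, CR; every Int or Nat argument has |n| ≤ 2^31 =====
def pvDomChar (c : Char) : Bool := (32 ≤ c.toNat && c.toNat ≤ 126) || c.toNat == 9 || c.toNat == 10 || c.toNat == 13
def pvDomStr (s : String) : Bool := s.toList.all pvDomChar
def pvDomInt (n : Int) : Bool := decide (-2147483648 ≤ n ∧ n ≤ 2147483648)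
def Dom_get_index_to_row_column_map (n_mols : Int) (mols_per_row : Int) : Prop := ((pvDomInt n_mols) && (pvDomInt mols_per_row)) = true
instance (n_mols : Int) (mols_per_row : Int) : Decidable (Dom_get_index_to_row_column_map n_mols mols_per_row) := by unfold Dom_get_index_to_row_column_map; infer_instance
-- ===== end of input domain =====

-- B replaces A's running (row, col) counters with a per-index divmod closed form (idiomatic, same cost).

-- ===== PORT A =====
-- one loop iteration of A: insert ith -> (r, c), then advance the (r, c) counters
def pvStepA (mols_per_row : Int) (st : PySem.Dict Int (Int × Int) × Int × Int) (ith : Int) :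
    PySem.Dict Int (Int × Int) × Int × Int :=
  let d := st.1.insert ith (st.2.1, st.2.2)
  if st.2.2 < mols_per_row - 1 then (d, st.2.1, st.2.2 + 1) else (d, st.2.1 + 1, 0)

def get_index_to_row_column_map (n_mols : Int) (mols_per_row : Int) : List (Int × Int × Int) :=
  ((PySem.List.pyRange 0 n_mols 1).foldl (pvStepA mols_per_row)
    (PySem.Dict.empty, 0, 0)).1.items

-- ===== PORT B =====
def get_index_to_row_column_map_alt (n_mols : Int) (mols_per_row : Int) : List (Int × Int × Int) :=
  if 0 < mols_per_row then
    (PySem.List.pyRange 0 n_mols 1).map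
      (fun i => (i, PySem.Int.floordiv i mols_per_row, PySem.Int.mod i mols_per_row))
  else
    (PySem.List.pyRange 0 n_mols 1).map (fun i => (i, i, 0))

-- ===== PRECONDITION & SPEC =====
def Spec_get_index_to_row_column_map (n_mols : Int) (mols_per_row : Int) (out : List (Int × Int × Int)) : Prop := out = get_index_to_row_column_map_alt n_mols mols_per_row
instance (n_mols : Int) (mols_per_row : Int) (out : List (Int × Int × Int)) : Decidable (Spec_get_index_to_row_column_map n_mols mols_per_row out) := by unfold Spec_get_index_to_row_column_map; infer_instance

-- ===== CLAIM (what is proved, stated in full; the proofs are below) =====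
def Claim_equal_get_index_to_row_column_map : Prop := ∀ (n_mols : Int) (mols_per_row : Int), Dom_get_index_to_row_column_map n_mols mols_per_row → Spec_get_index_to_row_column_map n_mols mols_per_row (get_index_to_row_column_map n_mols mols_per_row)

-- ===== LEMMAS AND PROOFS =====

-- the (row, col) position of index i (also the counter state after i iterations of A)
def pvRC (m i : Int) : Int × Int :=
  if 0 < m then (PySem.Int.floordiv i m, PySem.Int.mod i m) else (i, 0)

theorem pvRC_step (m n : Int) :
    (if (pvRC m n).2 < m - 1 then ((pvRC m n).1, (pvRC m n).2 + 1)
     else ((pvRC m n).1 + 1, 0)) = pvRC m (n + 1) := by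
  unfold pvRC
  by_cases hm : 0 < m
  · simp only [if_pos hm, PySem.Int.floordiv_eq_ediv_of_pos hm, PySem.Int.mod_eq_emod_of_pos hm]
    have h0 : 0 ≤ n % m := Int.emod_nonneg n (by omega)
    have h1 : n % m < m := Int.emod_lt_of_pos n hm
    have h2 : n / m * m + n % m = n := Int.ediv_mul_add_emod n m
    by_cases hc : n % m < m - 1
    · have key : n + 1 = (n % m + 1) + (n / m) * m := by omega
      have hd : (n + 1) / m = n / m := by
        rw [key, Int.add_mul_ediv_right _ _ (by omega : m ≠ 0),
            Int.ediv_eq_zero_of_lt (by omega) (by omega), zero_add]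
      have hmc : m * (n / m) = n / m * m := mul_comm m (n / m)
      have key2 : n + 1 = (n % m + 1) + m * (n / m) := by omega
      have he : (n + 1) % m = n % m + 1 := by
        rw [key2, Int.add_mul_emod_self_left]
        exact Int.emod_eq_of_lt (by omega) (by omega)
      simp [hc, hd, he]
    · have hx : (n / m + 1) * m = n / m * m + m := by ring
      have key : n + 1 = (n / m + 1) * m := by omega
      have hd : (n + 1) / m = n / m + 1 := by
        rw [key, Int.mul_ediv_cancel _ (by omega : m ≠ 0)]
      have he : (n + 1) % m = 0 := by
        rw [key, Int.mul_emod_left]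
      simp [hc, hd, he]
  · simp only [if_neg hm]
    have hcond : ¬ ((n, (0 : Int)).2 < m - 1) := by
      show ¬ ((0 : Int) < m - 1); omega
    rw [if_neg hcond]

-- invariant: A's fold over range(n) builds the closed-form table and ends with the counters at pvRC m n
theorem pvLoopA_eq (m : Int) : ∀ n : Int, 0 ≤ n →
    (PySem.List.pyRange 0 n 1).foldl (pvStepA m) (PySem.Dict.empty, 0, 0)
      = (PySem.Dict.mk ((PySem.List.pyRange 0 n 1).map (fun i => (i, pvRC m i))), pvRC m n) := by
  intro n hn
  induction n, hn using Int.le_induction with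
  | base =>
      have h0 : pvRC m 0 = (0, 0) := by
        unfold pvRC
        split
        · rename_i hm
          rw [PySem.Int.floordiv_eq_ediv_of_pos hm, PySem.Int.mod_eq_emod_of_pos hm]
          simp
        · rfl
      rw [PySem.List.pyRange_one_eq_nil (le_refl 0), h0]
      rfl
  | succ n hn ih =>
      have hfresh : (PySem.Dict.mk ((PySem.List.pyRange 0 n 1).map
          (fun i => (i, pvRC m i)))).contains n = false := by
        rw [PySem.Dict.contains_eq_decide_mem_keys]
        simp [PySem.List.mem_pyRange_one]
      have hins : (PySem.Dict.mk ((PySem.List.pyRange 0 n 1).map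
            (fun i => (i, pvRC m i)))).insert n (pvRC m n)
          = PySem.Dict.mk ((PySem.List.pyRange 0 (n + 1) 1).map (fun i => (i, pvRC m i))) := by
        apply PySem.Dict.ext
        rw [PySem.Dict.items_insert, hfresh,
            PySem.List.pyRange_one_succ_right (by omega : (0 : Int) ≤ n)]
        simp
      rw [PySem.List.pyRange_one_succ_right (by omega : (0 : Int) ≤ n), List.foldl_append, ih,
        ← pvRC_step m n]
      simp only [List.foldl_cons, List.foldl_nil, pvStepA]
      by_cases hc : (pvRC m n).2 < m - 1
      · rw [if_pos hc, if_pos hc]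
        simp [hins, PySem.List.pyRange_one_succ_right (by omega : (0 : Int) ≤ n)]
      · rw [if_neg hc, if_neg hc]
        simp [hins, PySem.List.pyRange_one_succ_right (by omega : (0 : Int) ≤ n)]

-- ===== VERDICT (by name: the statement is the Claim_ definition above) =====
theorem get_index_to_row_column_map_spec : Claim_equal_get_index_to_row_column_map := by
  intro n m _
  unfold Spec_get_index_to_row_column_map get_index_to_row_column_map get_index_to_row_column_map_alt
  by_cases hn : 0 ≤ n
  · rw [pvLoopA_eq m n hn]
    by_cases hm : 0 < m
    · simp [hm, pvRC]
    · simp [hm, pvRC]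
  · simp only [PySem.List.pyRange_one_eq_nil (by omega : n ≤ (0 : Int)), List.foldl_nil,
      List.map_nil]
    split <;> rfl
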